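-- pv_equiv track=rewrite | github.com/pypi-data/pypi-mirror-316 | packages/anubisgit/anubisgit-0.7.0.tar.gz/anubisgit-0.7.0/src/anubisgit/plot_common.py | stack_data
-- ===== SOURCE A (Python) =====
-- def stack_data(x_baseline: list, database: dict, key_to_stack_by: str) -> dict:
--     """
--     Take the database and add to the next key and item in the dict the previous values.
--     {"key_1" : [1,2,3], "key_2": [1,2,3]} -> {"key_1" : [1,2,3], "key_2": [2,4,6]}
--
--     Args:
--         x_baseline (list): Span of x values
--         database (dict): nested dictionnary to be sorted
--         key_to_stack_by (str): name of the key in which values have ot be sorted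
--
--     Returns:
--         (dict): dict with stacked values
--     """
--     stacked_data = {}
--     cumul_list = [0] * len(x_baseline)
--     for date_key, date_dict in database.items():
--         cumul_values = [
--             cumul_list[idx] + value
--             for idx, value in enumerate(date_dict[key_to_stack_by])
--         ]
--         stacked_data[date_key] = cumul_values
--         cumul_list = cumul_values
--
--     return stacked_data
-- ===== SOURCE B (Python) =====
-- def stack_data(x_baseline: list, database: dict, key_to_stack_by: str) -> dict:
--     """Recursive decomposition: emit the running element-wise sums as a list of
--     (key, cumulative_values) pairs, then build the result dict from it."""
--
--     def go(prev, items):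
--         if not items:
--             return []
--         (date_key, date_dict), rest = items[0], items[1:]
--         cur = [p + v for p, v in zip(prev, date_dict[key_to_stack_by])]
--         return [(date_key, cur)] + go(cur, rest)
--
--     return dict(go([0] * len(x_baseline), list(database.items())))
-- ===== Notes on version B (the rewrite author's own statement) =====
-- stated objective: simpler
-- what changed: A's imperative loop mutating a stacked_data dict and a cumul_list accumulator (indexing the previous sums via enumerate) is replaced by a recursive pass that zips the previous sums with each row, emits the (key, cumulative values) pairs as a list, and builds the dict once at the end.
import Mathlib
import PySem

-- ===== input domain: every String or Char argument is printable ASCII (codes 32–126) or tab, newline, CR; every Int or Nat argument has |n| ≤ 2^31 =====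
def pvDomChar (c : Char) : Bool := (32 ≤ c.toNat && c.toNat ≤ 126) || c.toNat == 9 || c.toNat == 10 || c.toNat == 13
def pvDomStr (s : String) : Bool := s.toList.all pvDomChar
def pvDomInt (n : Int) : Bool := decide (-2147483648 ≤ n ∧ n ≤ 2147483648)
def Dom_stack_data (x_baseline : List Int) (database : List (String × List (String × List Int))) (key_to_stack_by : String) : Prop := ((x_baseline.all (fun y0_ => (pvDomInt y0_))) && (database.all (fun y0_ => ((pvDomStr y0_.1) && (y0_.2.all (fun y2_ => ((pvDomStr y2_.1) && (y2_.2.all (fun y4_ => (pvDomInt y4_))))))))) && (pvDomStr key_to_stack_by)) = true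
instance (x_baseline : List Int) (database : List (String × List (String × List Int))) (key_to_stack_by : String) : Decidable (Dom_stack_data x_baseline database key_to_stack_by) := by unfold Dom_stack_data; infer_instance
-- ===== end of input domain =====

-- B replaces A's mutable dict-and-accumulator loop by a recursive pass that emits the
-- (key, cumulative values) pairs as a list (zipping the previous sums with the row) and
-- builds the dict once at the end — objective: simpler decomposition, same cost.


-- ===== PORT A =====
-- A's loop: state = (stacked_data dict, cumul_list); date_dict[key] is first-match dict
-- lookup (Dict.mk …).get?, totalised with .getD [] — outside Pre_ Python raises KeyError there;
-- cumul_list[idx] is pyGetD, totalised with default 0 — outside Pre_ Python raises IndexError.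
def stack_data (x_baseline : List Int) (database : List (String × List (String × List Int))) (key_to_stack_by : String) : List (String × List Int) :=
  (database.foldl
    (fun (st : PySem.Dict String (List Int) × List Int) kv =>
      let cumul_values :=
        (PySem.List.enumerate (((PySem.Dict.mk kv.2).get? key_to_stack_by).getD []) 0).map
          (fun p => PySem.List.pyGetD st.2 p.1 0 + p.2)
      (st.1.insert kv.1 cumul_values, cumul_values))
    (PySem.Dict.empty, List.replicate x_baseline.length 0)).1.items

-- ===== PORT B =====
-- B's recursive helper go(prev, items): emits the (key, cumulative) pairs front to back.
def stack_data_go (key_to_stack_by : String) (prev : List Int) :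
    List (String × List (String × List Int)) → List (String × List Int)
  | [] => []
  | (date_key, date_dict) :: rest =>
    let cur := (prev.zip (((PySem.Dict.mk date_dict).get? key_to_stack_by).getD [])).map
      (fun p => p.1 + p.2)
    (date_key, cur) :: stack_data_go key_to_stack_by cur rest

def stack_data_alt (x_baseline : List Int) (database : List (String × List (String × List Int))) (key_to_stack_by : String) : List (String × List Int) :=
  (PySem.Dict.ofList (stack_data_go key_to_stack_by (List.replicate x_baseline.length 0) database)).items

-- ===== PRECONDITION & SPEC =====
-- the per-entry row date_dict[key] (first-match lookup, [] when absent) — shared by Pre_ only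
def pvRow (date_dict : List (String × List Int)) (key_to_stack_by : String) : List Int :=
  ((PySem.Dict.mk date_dict).get? key_to_stack_by).getD []

-- Pre_ admits exactly the inputs where Python A returns: every entry's inner dict has the
-- key (else KeyError) and row lengths never grow along the chain started by x_baseline
-- (a longer row indexes past cumul_list: IndexError).
def Pre_stack_data (x_baseline : List Int) (database : List (String × List (String × List Int))) (key_to_stack_by : String) : Prop :=
  (∀ e ∈ database, ((PySem.Dict.mk e.2).get? key_to_stack_by).isSome) ∧
  List.IsChain (fun a b => b ≤ a)
    (x_baseline.length :: (database.map (fun e => pvRow e.2 key_to_stack_by)).map List.length)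
instance (x_baseline : List Int) (database : List (String × List (String × List Int))) (key_to_stack_by : String) : Decidable (Pre_stack_data x_baseline database key_to_stack_by) := by unfold Pre_stack_data; infer_instance

def pvWitness_stack_data : List Int × (List (String × List (String × List Int))) × String :=
  ([0, 0, 0], [("d1", [("k", [1, 2, 3])]), ("d2", [("k", [1, 2, 3])])], "k")

def Spec_stack_data (x_baseline : List Int) (database : List (String × List (String × List Int))) (key_to_stack_by : String) (out : List (String × List Int)) : Prop := out = stack_data_alt x_baseline database key_to_stack_by
instance (x_baseline : List Int) (database : List (String × List (String × List Int))) (key_to_stack_by : String) (out : List (String × List Int)) : Decidable (Spec_stack_data x_baseline database key_to_stack_by out) := by unfold Spec_stack_data; infer_instance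

-- ===== CLAIM (what is proved, stated in full; the proofs are below) =====
def Claim_equal_stack_data : Prop := ∀ (x_baseline : List Int) (database : List (String × List (String × List Int))) (key_to_stack_by : String), Dom_stack_data x_baseline database key_to_stack_by → Pre_stack_data x_baseline database key_to_stack_by → Spec_stack_data x_baseline database key_to_stack_by (stack_data x_baseline database key_to_stack_by)

-- ===== LEMMAS AND PROOFS =====

-- A's comprehension over enumerate+index equals B's zip when the row is not longer than prev.
lemma cumul_eq_zip (vals : List Int) :
    ∀ (s : Nat) (full prev : List Int), full.drop s = prev → vals.length ≤ prev.length →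
    (PySem.List.enumerate vals (s : Int)).map (fun p => PySem.List.pyGetD full p.1 0 + p.2)
      = (prev.zip vals).map (fun p => p.1 + p.2) := by
  induction vals with
  | nil => intro s full prev _ _; simp [PySem.List.enumerate]
  | cons v vs ih =>
    intro s full prev hdrop hlen
    cases prev with
    | nil => simp at hlen
    | cons p ps =>
      have h0 : full[s]? = some p := by
        have h := List.getElem?_drop (xs := full) (i := s) (j := 0)
        rw [hdrop] at h
        simpa using h.symm
      have hget : full.getD s 0 = p := by rw [List.getD_eq_getElem?_getD, h0]; rfl
      have hdrop' : full.drop (s + 1) = ps := by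
        rw [← List.tail_drop, hdrop]
        rfl
      rw [PySem.List.enumerate_cons]
      simp only [List.map_cons, List.zip_cons_cons, PySem.List.pyGetD_natCast, hget]
      refine congrArg₂ List.cons rfl ?_
      have hcast : ((s : Int) + 1) = ((s + 1 : Nat) : Int) := by push_cast; ring
      rw [hcast]
      exact ih (s + 1) full ps hdrop' (by simpa using hlen)

-- zip keeps the row's length when the row is not longer than prev.
lemma zip_len (prev vals : List Int) (h : vals.length ≤ prev.length) :
    ((prev.zip vals).map (fun p : Int × Int => p.1 + p.2)).length = vals.length := by
  simp [List.length_zip]; omega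

-- A's fold, started at any dict d and running sums prev, matches inserting B's emitted pairs.
lemma fold_eq_go (key_to_stack_by : String) :
    ∀ (l : List (String × List (String × List Int))) (d : PySem.Dict String (List Int)) (prev : List Int),
    List.IsChain (fun a b => b ≤ a)
      (prev.length :: (l.map (fun e => pvRow e.2 key_to_stack_by)).map List.length) →
    (l.foldl
      (fun (st : PySem.Dict String (List Int) × List Int) kv =>
        let cumul_values :=
          (PySem.List.enumerate (((PySem.Dict.mk kv.2).get? key_to_stack_by).getD []) 0).map
            (fun p => PySem.List.pyGetD st.2 p.1 0 + p.2)
        (st.1.insert kv.1 cumul_values, cumul_values))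
      (d, prev)).1
      = (stack_data_go key_to_stack_by prev l).foldl (fun d' p => d'.insert p.1 p.2) d := by
  intro l
  induction l with
  | nil => intro d prev _; rfl
  | cons kv rest ih =>
    intro d prev hchain
    obtain ⟨k, inner⟩ := kv
    simp only [List.map_cons, List.isChain_cons_cons, pvRow] at hchain
    obtain ⟨hle', hchain'⟩ := hchain
    have hcur : (PySem.List.enumerate (((PySem.Dict.mk inner).get? key_to_stack_by).getD []) 0).map
        (fun p => PySem.List.pyGetD prev p.1 0 + p.2)
        = (prev.zip (((PySem.Dict.mk inner).get? key_to_stack_by).getD [])).map (fun p => p.1 + p.2) :=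
      cumul_eq_zip _ 0 prev prev rfl hle'
    simp only [List.foldl_cons, stack_data_go]
    rw [hcur]
    apply ih
    rw [zip_len prev _ hle']
    exact hchain'

-- ===== VERDICT (by name: the statement is the Claim_ definition above) =====
theorem stack_data_spec : Claim_equal_stack_data := by
  intro x_baseline database key_to_stack_by _ hpre
  unfold Spec_stack_data stack_data stack_data_alt
  rw [fold_eq_go key_to_stack_by database PySem.Dict.empty (List.replicate x_baseline.length 0)
    (by simpa using hpre.2)]
  rfl
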